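-- pv_equiv track=rewrite | github.com/SebastianCB-dev/python-universidad-andes | Modulo3/manos_a_la_obra/ejercicio12.py | producto_mas_barato
-- ===== SOURCE A (Python) =====
-- def producto_mas_barato(catalogo: dict) -> str:
--     result = ''
--     mas_barato = None
--     nombres_mas_baratos = []
--     if len(catalogo) == 0:
--         result = 'No hay productos para escoger'
--     else:
--         keys = list(catalogo.keys())
--         mas_barato = keys[0]
--
--         for key in catalogo.keys():
--             if catalogo[key] < catalogo[mas_barato]:
--                 mas_barato = key
--
--         for key in catalogo.keys():
--             if catalogo[key] == catalogo[mas_barato]: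
--                 nombres_mas_baratos.append(key)
--
--         if catalogo[mas_barato] > 10000:
--             result = None
--         else:
--             result = min(nombres_mas_baratos)
--
--     return result
-- ===== SOURCE B (Python) =====
-- def producto_mas_barato(catalogo: dict) -> str:
--     # Single pass: running (best_name, min_price); reset name on strict drop,
--     # take the lexicographically smaller name on a price tie.
--     if len(catalogo) == 0:
--         return 'No hay productos para escoger'
--     it = iter(catalogo.items())
--     best_name, min_price = next(it)
--     for name, price in it:
--         if price < min_price:
--             best_name, min_price = name, price
--         elif price == min_price and name < best_name:
--             best_name = name
--     return None if min_price > 10000 else best_name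
-- ===== Notes on version B (the rewrite author's own statement) =====
-- stated objective: simpler
-- what changed: Replaces A's three passes (find a min-price key, collect all keys at that price, take min of the list) by one pass over items() maintaining a (best_name, min_price) pair.
import Mathlib
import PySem

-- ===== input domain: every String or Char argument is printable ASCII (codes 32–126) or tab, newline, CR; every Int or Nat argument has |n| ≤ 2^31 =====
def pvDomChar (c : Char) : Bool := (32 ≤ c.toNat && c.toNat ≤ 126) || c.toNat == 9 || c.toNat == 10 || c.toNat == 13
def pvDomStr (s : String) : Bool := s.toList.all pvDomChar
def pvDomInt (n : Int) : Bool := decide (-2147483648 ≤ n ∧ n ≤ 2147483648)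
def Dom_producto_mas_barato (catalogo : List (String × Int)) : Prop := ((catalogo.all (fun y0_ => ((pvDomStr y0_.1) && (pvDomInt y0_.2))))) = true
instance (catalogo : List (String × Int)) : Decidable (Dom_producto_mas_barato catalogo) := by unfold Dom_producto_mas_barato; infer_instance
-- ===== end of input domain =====

-- B replaces A's three passes over the dict by one pass keeping a (best_name, min_price) pair; objective: simpler.

-- ===== PORT A =====
def producto_mas_barato (catalogo : List (String × Int)) : Option String :=
  let d := PySem.Dict.ofList catalogo
  if d.size = 0 then some "No hay productos para escoger"
  else
    match d.keys with
    | [] => none  -- unreachable: size ≠ 0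
    | k0 :: _ =>
      let mas_barato := d.keys.foldl (fun mb k => if d.getD k 0 < d.getD mb 0 then k else mb) k0
      let nombres := d.keys.foldl (fun acc k => if d.getD k 0 == d.getD mas_barato 0 then acc ++ [k] else acc) ([] : List String)
      if d.getD mas_barato 0 > 10000 then none
      else PySem.List.min? nombres (fun x => x)

-- ===== PORT B =====
def producto_mas_barato_alt (catalogo : List (String × Int)) : Option String :=
  match (PySem.Dict.ofList catalogo).items with
  | [] => some "No hay productos para escoger"
  | p0 :: rest =>
    let best := rest.foldl (fun acc (p : String × Int) =>
        if p.2 < acc.2 then p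
        else if p.2 == acc.2 && decide (p.1 < acc.1) then (p.1, acc.2) else acc) p0
    if best.2 > 10000 then none else some best.1

-- ===== PRECONDITION & SPEC =====
def Spec_producto_mas_barato (catalogo : List (String × Int)) (out : Option String) : Prop := out = producto_mas_barato_alt catalogo
instance (catalogo : List (String × Int)) (out : Option String) : Decidable (Spec_producto_mas_barato catalogo out) := by unfold Spec_producto_mas_barato; infer_instance

-- ===== CLAIM (what is proved, stated in full; the proofs are below) =====
def Claim_equal_producto_mas_barato : Prop := ∀ (catalogo : List (String × Int)), Dom_producto_mas_barato catalogo → Spec_producto_mas_barato catalogo (producto_mas_barato catalogo)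

-- ===== LEMMAS AND PROOFS =====

-- B's fold step, abbreviated
def pvMeet (a b : String × Int) : String × Int :=
  if b.2 < a.2 then b else if b.2 == a.2 && decide (b.1 < a.1) then (b.1, a.2) else a

-- A's first-loop step, abbreviated (on pairs)
def pvAmin (a b : String × Int) : String × Int := if b.2 < a.2 then b else a

theorem pvMeet_cases (a b : String × Int) : pvMeet a b = a ∨ pvMeet a b = b := by
  unfold pvMeet
  split_ifs with h1 h2
  · exact Or.inr rfl
  · right
    simp only [Bool.and_eq_true, beq_iff_eq, decide_eq_true_eq] at h2
    exact Prod.ext rfl h2.1.symm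
  · exact Or.inl rfl

theorem pvMeet_spec (a b : String × Int) :
    (pvMeet a b).2 ≤ a.2 ∧ (pvMeet a b).2 ≤ b.2 ∧
    (a.2 = (pvMeet a b).2 → (pvMeet a b).1 ≤ a.1) ∧
    (b.2 = (pvMeet a b).2 → (pvMeet a b).1 ≤ b.1) := by
  unfold pvMeet
  split_ifs with h1 h2
  · exact ⟨le_of_lt h1, le_rfl, fun h => absurd h1 (by omega), fun _ => le_rfl⟩
  · simp only [Bool.and_eq_true, beq_iff_eq, decide_eq_true_eq] at h2
    exact ⟨le_rfl, by omega, fun _ => le_of_lt h2.2, fun _ => le_rfl⟩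
  · refine ⟨le_rfl, by omega, fun _ => le_rfl, fun h => ?_⟩
    simp only [Bool.and_eq_true, beq_iff_eq, decide_eq_true_eq, not_and, not_lt] at h2
    exact h2 h

theorem pvMeet_fold_spec (l : List (String × Int)) : ∀ (a : String × Int),
    (l.foldl pvMeet a) ∈ a :: l ∧
    ∀ p ∈ a :: l, (l.foldl pvMeet a).2 ≤ p.2 ∧ (p.2 = (l.foldl pvMeet a).2 → (l.foldl pvMeet a).1 ≤ p.1) := by
  induction l with
  | nil =>
    intro a
    refine ⟨List.mem_singleton.mpr rfl, ?_⟩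
    intro p hp
    rw [List.mem_singleton] at hp
    subst hp
    exact ⟨le_rfl, fun _ => le_rfl⟩
  | cons b t ih =>
    intro a
    obtain ⟨hmem, hbnd⟩ := ih (pvMeet a b)
    simp only [List.foldl_cons]
    set r := t.foldl pvMeet (pvMeet a b) with hr
    have hmb := pvMeet_spec a b
    have hrmb : r.2 ≤ (pvMeet a b).2 ∧ ((pvMeet a b).2 = r.2 → r.1 ≤ (pvMeet a b).1) :=
      hbnd (pvMeet a b) (List.mem_cons_self)
    constructor
    · rcases List.mem_cons.mp hmem with h | h
      · rcases pvMeet_cases a b with hc | hc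
        · rw [hc] at h; exact List.mem_cons.mpr (Or.inl h)
        · rw [hc] at h; exact List.mem_cons.mpr (Or.inr (List.mem_cons.mpr (Or.inl h)))
      · exact List.mem_cons.mpr (Or.inr (List.mem_cons.mpr (Or.inr h)))
    · intro p hp
      rcases List.mem_cons.mp hp with h | h
      · subst h
        refine ⟨le_trans hrmb.1 hmb.1, fun hpe => ?_⟩
        have he : (pvMeet p b).2 = r.2 := le_antisymm (by omega) hrmb.1
        exact le_trans (hrmb.2 he) (hmb.2.2.1 (by omega))
      rcases List.mem_cons.mp h with h' | h'
      · subst h'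
        refine ⟨le_trans hrmb.1 hmb.2.1, fun hpe => ?_⟩
        have he : (pvMeet a p).2 = r.2 := le_antisymm (by omega) hrmb.1
        exact le_trans (hrmb.2 he) (hmb.2.2.2 (by omega))
      · exact hbnd p (List.mem_cons.mpr (Or.inr h'))

theorem pvAmin_fold_spec (l : List (String × Int)) : ∀ (a : String × Int),
    (l.foldl pvAmin a) ∈ a :: l ∧ ∀ p ∈ a :: l, (l.foldl pvAmin a).2 ≤ p.2 := by
  induction l with
  | nil =>
    intro a
    refine ⟨List.mem_singleton.mpr rfl, ?_⟩
    intro p hp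
    rw [List.mem_singleton] at hp
    subst hp
    exact le_rfl
  | cons b t ih =>
    intro a
    obtain ⟨hmem, hbnd⟩ := ih (pvAmin a b)
    simp only [List.foldl_cons]
    set r := t.foldl pvAmin (pvAmin a b) with hr
    have hra : r.2 ≤ (pvAmin a b).2 := hbnd (pvAmin a b) (List.mem_cons_self)
    have hab : (pvAmin a b).2 ≤ a.2 ∧ (pvAmin a b).2 ≤ b.2 := by
      unfold pvAmin; split_ifs with h; omega; omega
    constructor
    · rcases List.mem_cons.mp hmem with h | h
      · unfold pvAmin at h
        split_ifs at h
        · exact List.mem_cons.mpr (Or.inr (List.mem_cons.mpr (Or.inl h)))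
        · exact List.mem_cons.mpr (Or.inl h)
      · exact List.mem_cons.mpr (Or.inr (List.mem_cons.mpr (Or.inr h)))
    · intro p hp
      rcases List.mem_cons.mp hp with h | h
      · subst h; omega
      rcases List.mem_cons.mp h with h' | h'
      · subst h'; omega
      · exact hbnd p (List.mem_cons.mpr (Or.inr h'))

-- A's first loop over keys, with lookups replaced by the paired values
theorem pvFoldA (d : PySem.Dict String Int) (hnd : d.keys.Nodup) :
    ∀ (l : List (String × Int)) (a : String × Int), (∀ p ∈ l, p ∈ d.items) → a ∈ d.items →
      (l.map Prod.fst).foldl (fun mb k => if d.getD k 0 < d.getD mb 0 then k else mb) a.1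
        = (l.foldl pvAmin a).1 ∧ (l.foldl pvAmin a) ∈ d.items := by
  intro l
  induction l with
  | nil => exact fun a _ ha => ⟨rfl, ha⟩
  | cons b t ih =>
    intro a hl ha
    have hb : b ∈ d.items := hl b (List.mem_cons_self)
    have hga : d.getD a.1 0 = a.2 := PySem.Dict.getD_of_mem_items d ((by simpa using ha : (a.1, a.2) ∈ d.items)) hnd 0
    have hgb : d.getD b.1 0 = b.2 := PySem.Dict.getD_of_mem_items d ((by simpa using hb : (b.1, b.2) ∈ d.items)) hnd 0
    have ht : ∀ p ∈ t, p ∈ d.items := fun p hp => hl p (List.mem_cons.mpr (Or.inr hp))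
    simp only [List.map_cons, List.foldl_cons, hga, hgb]
    unfold pvAmin
    split_ifs with h
    · exact ih b ht hb
    · exact ih a ht ha

-- A's second loop builds exactly the first components of the pairs whose price equals m
theorem pvFoldNombres (d : PySem.Dict String Int) (hnd : d.keys.Nodup) (m : Int) :
    ∀ (l : List (String × Int)) (acc : List String), (∀ p ∈ l, p ∈ d.items) →
      (l.map Prod.fst).foldl (fun acc k => if d.getD k 0 == m then acc ++ [k] else acc) acc
        = acc ++ (l.filter (fun p => p.2 == m)).map Prod.fst := by
  intro l
  induction l with
  | nil => simp
  | cons b t ih =>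
    intro acc hl
    have hgb : d.getD b.1 0 = b.2 := PySem.Dict.getD_of_mem_items d ((by simpa using hl b (List.mem_cons_self) : (b.1, b.2) ∈ d.items)) hnd 0
    have ht : ∀ p ∈ t, p ∈ d.items := fun p hp => hl p (List.mem_cons.mpr (Or.inr hp))
    simp only [List.map_cons, List.foldl_cons, List.filter_cons, hgb]
    cases h : (b.2 == m) with
    | true =>
      rw [if_pos rfl, if_pos rfl, ih (acc ++ [b.1]) ht, List.map_cons, List.append_assoc]
      rfl
    | false =>
      rw [if_neg (by simp), if_neg (by simp), ih acc ht]

theorem pvFoldlMin {α : Type} [LinearOrder α] (l : List α) (y : α) : ∀ (a : α),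
    y ∈ a :: l → (∀ x ∈ a :: l, y ≤ x) → l.foldl min a = y := by
  induction l with
  | nil =>
    intro a hy hle
    simp at hy
    exact le_antisymm (hy ▸ le_rfl) (hle a (List.mem_singleton.mpr rfl))
  | cons b t ih =>
    intro a hy hle
    simp only [List.foldl_cons]
    have hle' : ∀ x ∈ min a b :: t, y ≤ x := by
      intro x hx
      rcases List.mem_cons.mp hx with h | h
      · subst h
        exact le_min (hle a (by simp)) (hle b (by simp))
      · exact hle x (by simp [h])
    apply ih (min a b)
    · rcases List.mem_cons.mp hy with h | h
      · subst h
        have : min y b = y := min_eq_left (hle b (by simp))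
        exact List.mem_cons.mpr (Or.inl this.symm)
      rcases List.mem_cons.mp h with h' | h'
      · subst h'
        have : min a y = y := min_eq_right (hle a (by simp))
        exact List.mem_cons.mpr (Or.inl this.symm)
      · exact List.mem_cons.mpr (Or.inr h')
    · exact hle'

theorem pvMin?Eq (l : List String) (y : String) (hy : y ∈ l) (hle : ∀ x ∈ l, y ≤ x) :
    PySem.List.min? l (fun x => x) = some y := by
  cases l with
  | nil => cases hy
  | cons a t =>
    rw [PySem.List.min?_id_cons]
    exact congrArg some (pvFoldlMin t y a hy hle)

-- ===== VERDICT (by name: the statement is the Claim_ definition above) =====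
theorem producto_mas_barato_spec : Claim_equal_producto_mas_barato := by
  intro catalogo _
  unfold Spec_producto_mas_barato producto_mas_barato producto_mas_barato_alt
  have hnd : (PySem.Dict.ofList catalogo).keys.Nodup := PySem.Dict.nodup_keys_ofList catalogo
  set d := PySem.Dict.ofList catalogo with hd
  cases hitems : d.items with
  | nil =>
    have hk : d.keys = [] := by simp [PySem.Dict.keys, hitems]
    have hs : d.size = 0 := by simp [PySem.Dict.size, hitems]
    simp [hs]
  | cons p0 rest =>
    have hk : d.keys = p0.1 :: rest.map Prod.fst := by simp [PySem.Dict.keys, hitems]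
    have hs : ¬ d.size = 0 := by simp [PySem.Dict.size, hitems]
    simp only [hs, if_false, hk]
    -- A's first loop: over all keys starting from p0.1
    have hmemL : ∀ p ∈ p0 :: rest, p ∈ d.items := by rw [hitems]; exact fun p hp => hp
    have hp0 : p0 ∈ d.items := hmemL p0 (List.mem_cons_self)
    have hA1 := pvFoldA d hnd (p0 :: rest) p0 hmemL hp0
    have hfull : (p0 :: rest).foldl pvAmin p0 = rest.foldl pvAmin p0 := by
      simp only [List.foldl_cons]
      have : pvAmin p0 p0 = p0 := by unfold pvAmin; simp
      rw [this]
    set s := rest.foldl pvAmin p0 with hsdef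
    rw [hfull] at hA1
    have hAeq : (p0.1 :: rest.map Prod.fst).foldl (fun mb k => if d.getD k 0 < d.getD mb 0 then k else mb) p0.1 = s.1 := by
      have : (p0.1 :: rest.map Prod.fst) = ((p0 :: rest).map Prod.fst) := by simp
      rw [this]; exact hA1.1
    set r := rest.foldl (fun acc (p : String × Int) =>
        if p.2 < acc.2 then p
        else if p.2 == acc.2 && decide (p.1 < acc.1) then (p.1, acc.2) else acc) p0 with hrdef
    have hrmeet : r = rest.foldl pvMeet p0 := by rfl
    -- s and r have the same (minimal) price
    have hSspec := pvAmin_fold_spec rest p0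
    rw [← hsdef] at hSspec
    have hRspec := pvMeet_fold_spec rest p0
    rw [← hrmeet] at hRspec
    have hprice : s.2 = r.2 :=
      le_antisymm (hSspec.2 r hRspec.1) (hRspec.2 s hSspec.1).1
    have hgs : d.getD s.1 0 = s.2 := by
      refine PySem.Dict.getD_of_mem_items d ?_ hnd 0
      have := hSspec.1
      rw [hitems]; simpa using this
    -- A's second loop
    have hN := pvFoldNombres d hnd (d.getD s.1 0) (p0 :: rest) [] hmemL
    have hN' : (p0.1 :: rest.map Prod.fst) = ((p0 :: rest).map Prod.fst) := by simp
    rw [hAeq, hN', hN, List.nil_append, hgs, hprice]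
    -- final comparison
    by_cases hbig : r.2 > 10000
    · simp [hbig]
    · simp only [hbig, if_false]
      refine pvMin?Eq _ r.1 ?_ ?_
      · refine List.mem_map.mpr ⟨r, ?_, rfl⟩
        refine List.mem_filter.mpr ⟨hRspec.1, by simp⟩
      · intro x hx
        rcases List.mem_map.mp hx with ⟨p, hpf, hpx⟩
        rcases List.mem_filter.mp hpf with ⟨hpm, hpe⟩
        have : p.2 = r.2 := by simpa using hpe
        subst hpx
        exact (hRspec.2 p hpm).2 this
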